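-- pv_equiv track=rewrite | github.com/KyleDSLU/diacritic_restoration | preprocess.py | _ngram_countanalysis
-- ===== SOURCE A (Python) =====
-- import operator
--
-- def _ngram_countanalysis(l_d, l_nd, d_diacritic):
--     count_d = []
--     count_nd = []
--     for i in range(len(l_d)):
--         if l_d[i] in d_diacritic.keys():
--             count_d.append(d_diacritic[l_d[i]])
--         else:
--             count_d.append(0)
--         if l_nd[i] in d_diacritic.keys():
--             count_nd.append(d_diacritic[l_nd[i]])
--         else:
--             count_nd.append(0)
--
--     return max(enumerate(count_d), key=operator.itemgetter(1)), max(enumerate(count_nd), key=operator.itemgetter(1))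
-- ===== SOURCE B (Python) =====
-- def _ngram_countanalysis(l_d, l_nd, d_diacritic):
--     # Single streaming pass keeping the running argmax of each side;
--     # strict ">" keeps the first maximum, as Python's max does.
--     if not l_d:
--         raise ValueError("max() arg is an empty sequence")
--     best_d = None
--     best_nd = None
--     for i in range(len(l_d)):
--         w_d = l_d[i]
--         w_nd = l_nd[i]
--         v_d = d_diacritic[w_d] if w_d in d_diacritic else 0
--         v_nd = d_diacritic[w_nd] if w_nd in d_diacritic else 0
--         if best_d is None or v_d > best_d[1]:
--             best_d = (i, v_d)
--         if best_nd is None or v_nd > best_nd[1]: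
--             best_nd = (i, v_nd)
--     return best_d, best_nd
-- ===== Notes on version B (the rewrite author's own statement) =====
-- stated objective: alternative
-- what changed: Replaces the build-two-count-lists-then-max(enumerate) structure by one streaming loop that maintains the running (index, value) argmax for both lists, never materializing the count lists.
import Mathlib
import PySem

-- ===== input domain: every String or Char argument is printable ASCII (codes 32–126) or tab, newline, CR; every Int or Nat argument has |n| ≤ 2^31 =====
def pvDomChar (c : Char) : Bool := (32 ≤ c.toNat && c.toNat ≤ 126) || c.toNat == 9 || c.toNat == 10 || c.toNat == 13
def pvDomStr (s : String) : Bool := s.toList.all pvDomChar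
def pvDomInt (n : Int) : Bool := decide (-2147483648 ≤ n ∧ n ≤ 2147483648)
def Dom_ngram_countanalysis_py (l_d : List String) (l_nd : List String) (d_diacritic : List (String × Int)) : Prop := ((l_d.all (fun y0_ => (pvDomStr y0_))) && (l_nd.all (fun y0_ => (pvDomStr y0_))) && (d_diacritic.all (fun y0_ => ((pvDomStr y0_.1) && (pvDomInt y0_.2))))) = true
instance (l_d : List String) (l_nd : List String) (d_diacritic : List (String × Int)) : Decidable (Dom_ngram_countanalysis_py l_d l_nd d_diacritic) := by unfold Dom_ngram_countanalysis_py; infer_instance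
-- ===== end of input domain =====

-- B replaces A's build-two-count-lists-then-max(enumerate) structure by a single
-- streaming loop keeping the running (index, value) argmax of each list (alternative
-- decomposition, same cost).


-- ===== PORT A =====
-- max(enumerate(xs), key=operator.itemgetter(1)): first maximal (index, value) pair.
-- The [] case is Python's ValueError, excluded by Pre_.
def pyMaxSnd (l : List (Int × Int)) : Int × Int :=
  match l with
  | [] => (0, 0)
  | p :: rest => rest.foldl (fun b q => if b.2 < q.2 then q else b) p

def ngram_countanalysis_py (l_d : List String) (l_nd : List String) (d_diacritic : List (String × Int)) : (Int × Int) × (Int × Int) :=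
  let d := PySem.Dict.mk d_diacritic
  let counts := (PySem.List.pyRange 0 (l_d.length : Int) 1).foldl
    (fun (acc : List Int × List Int) i =>
      (acc.1 ++ [if d.contains (PySem.List.pyGetD l_d i "") then d.getD (PySem.List.pyGetD l_d i "") 0 else 0],
       acc.2 ++ [if d.contains (PySem.List.pyGetD l_nd i "") then d.getD (PySem.List.pyGetD l_nd i "") 0 else 0]))
    ([], [])
  (pyMaxSnd (PySem.List.enumerate counts.1 0), pyMaxSnd (PySem.List.enumerate counts.2 0))

-- ===== PORT B =====
def ngram_countanalysis_py_alt (l_d : List String) (l_nd : List String) (d_diacritic : List (String × Int)) : (Int × Int) × (Int × Int) :=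
  let d := PySem.Dict.mk d_diacritic
  let st := (PySem.List.pyRange 0 (l_d.length : Int) 1).foldl
    (fun (acc : Option ((Int × Int) × (Int × Int))) i =>
      let vd := if d.contains (PySem.List.pyGetD l_d i "") then d.getD (PySem.List.pyGetD l_d i "") 0 else 0
      let vnd := if d.contains (PySem.List.pyGetD l_nd i "") then d.getD (PySem.List.pyGetD l_nd i "") 0 else 0
      match acc with
      | none => some ((i, vd), (i, vnd))
      | some (bd, bnd) =>
        some ((if bd.2 < vd then (i, vd) else bd), (if bnd.2 < vnd then (i, vnd) else bnd)))
    none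
  st.getD ((0, 0), (0, 0))

-- ===== PRECONDITION & SPEC =====
-- Pre_ excludes exactly the inputs where Python A raises: empty l_d (ValueError from
-- max([])) and l_nd shorter than l_d (IndexError on l_nd[i]).
def Pre_ngram_countanalysis_py (l_d : List String) (l_nd : List String) (d_diacritic : List (String × Int)) : Prop :=
  l_d ≠ [] ∧ l_d.length ≤ l_nd.length
instance (l_d : List String) (l_nd : List String) (d_diacritic : List (String × Int)) : Decidable (Pre_ngram_countanalysis_py l_d l_nd d_diacritic) := by unfold Pre_ngram_countanalysis_py; infer_instance

def pvWitness_ngram_countanalysis_py : List String × List String × (List (String × Int)) :=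
  (["ab", "cd"], ["cd", "ab"], [("cd", 2)])

def Spec_ngram_countanalysis_py (l_d : List String) (l_nd : List String) (d_diacritic : List (String × Int)) (out : (Int × Int) × (Int × Int)) : Prop := out = ngram_countanalysis_py_alt l_d l_nd d_diacritic
instance (l_d : List String) (l_nd : List String) (d_diacritic : List (String × Int)) (out : (Int × Int) × (Int × Int)) : Decidable (Spec_ngram_countanalysis_py l_d l_nd d_diacritic out) := by unfold Spec_ngram_countanalysis_py; infer_instance

-- ===== CLAIM (what is proved, stated in full; the proofs are below) =====
def Claim_equal_ngram_countanalysis_py : Prop := ∀ (l_d : List String) (l_nd : List String) (d_diacritic : List (String × Int)), Dom_ngram_countanalysis_py l_d l_nd d_diacritic → Pre_ngram_countanalysis_py l_d l_nd d_diacritic → Spec_ngram_countanalysis_py l_d l_nd d_diacritic (ngram_countanalysis_py l_d l_nd d_diacritic)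

-- ===== LEMMAS AND PROOFS =====

-- A's loop appends one value per index to each of the two count lists: it is a map.
theorem pv_foldl_pair_append (l : List Int) (f g : Int → Int) (a b : List Int) :
    l.foldl (fun (acc : List Int × List Int) i => (acc.1 ++ [f i], acc.2 ++ [g i])) (a, b)
      = (a ++ l.map f, b ++ l.map g) := by
  induction l generalizing a b with
  | nil => simp
  | cons x xs ih => simp [List.foldl_cons, ih]

-- enumerate of a list mapped over a unit-step range re-pairs each value with its index.
theorem pv_enumerate_map_pyRange (f : Int → Int) (a b : Int) :
    PySem.List.enumerate ((PySem.List.pyRange a b 1).map f) a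
      = (PySem.List.pyRange a b 1).map (fun i => (i, f i)) := by
  by_cases h : a < b
  · have hn : ((b - a).toNat) = (b - a).toNat := rfl
    -- induction on the length of the range
    have : ∀ (n : Nat) (a : Int), (b - a).toNat = n →
        PySem.List.enumerate ((PySem.List.pyRange a b 1).map f) a
          = (PySem.List.pyRange a b 1).map (fun i => (i, f i)) := by
      intro n
      induction n with
      | zero =>
        intro a ha
        have : b ≤ a := by omega
        simp [PySem.List.pyRange_one_eq_nil this]
      | succ n ih =>
        intro a ha
        have hab : a < b := by omega
        rw [PySem.List.pyRange_one_cons hab]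
        simp only [List.map_cons, PySem.List.enumerate_cons]
        rw [ih (a + 1) (by omega)]
    exact this _ a rfl
  · have : b ≤ a := by omega
    simp [PySem.List.pyRange_one_eq_nil this]

-- B's option-state streaming fold splits into the two per-list argmax folds.
theorem pv_foldl_opt (l : List Int) (F G : Int → Int) (p q : Int × Int) :
    l.foldl (fun (acc : Option ((Int × Int) × (Int × Int))) i =>
        match acc with
        | none => some ((i, F i), (i, G i))
        | some (bd, bnd) =>
          some ((if bd.2 < F i then (i, F i) else bd), (if bnd.2 < G i then (i, G i) else bnd)))
      (some (p, q))
      = some (l.foldl (fun b i => if b.2 < F i then (i, F i) else b) p,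
              l.foldl (fun b i => if b.2 < G i then (i, G i) else b) q) := by
  induction l generalizing p q with
  | nil => rfl
  | cons x xs ih => simp only [List.foldl_cons]; exact ih _ _

-- ===== VERDICT (by name: the statement is the Claim_ definition above) =====
theorem ngram_countanalysis_py_spec : Claim_equal_ngram_countanalysis_py := by
  intro l_d l_nd dd _dom hpre
  obtain ⟨hne, _⟩ := hpre
  have hn : (0 : Int) < (l_d.length : Int) := by
    cases l_d with
    | nil => exact absurd rfl hne
    | cons x xs => simp
  unfold Spec_ngram_countanalysis_py ngram_countanalysis_py ngram_countanalysis_py_alt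
  set d := PySem.Dict.mk dd with hd
  set F : Int → Int := fun i =>
    if d.contains (PySem.List.pyGetD l_d i "") then d.getD (PySem.List.pyGetD l_d i "") 0 else 0 with hF
  set G : Int → Int := fun i =>
    if d.contains (PySem.List.pyGetD l_nd i "") then d.getD (PySem.List.pyGetD l_nd i "") 0 else 0 with hG
  simp only []
  rw [show (fun (acc : List Int × List Int) i =>
        (acc.1 ++ [if d.contains (PySem.List.pyGetD l_d i "") then d.getD (PySem.List.pyGetD l_d i "") 0 else 0],
         acc.2 ++ [if d.contains (PySem.List.pyGetD l_nd i "") then d.getD (PySem.List.pyGetD l_nd i "") 0 else 0]))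
      = (fun (acc : List Int × List Int) i => (acc.1 ++ [F i], acc.2 ++ [G i])) from rfl]
  rw [pv_foldl_pair_append]
  simp only [List.nil_append]
  rw [pv_enumerate_map_pyRange F 0 (l_d.length : Int),
      pv_enumerate_map_pyRange G 0 (l_d.length : Int)]
  rw [PySem.List.pyRange_one_cons hn]
  simp only [List.map_cons, List.foldl_cons, pyMaxSnd]
  rw [pv_foldl_opt]
  simp only [List.foldl_map, Option.getD_some]
  rfl
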